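-- pv_equiv track=rewrite | github.com/kim130727/modu_math | src/modu_semantic/output.py | _root_key_diff
-- ===== SOURCE A (Python) =====
-- from typing import Any
--
-- def _root_key_diff(current: dict[str, Any], baseline: dict[str, Any]) -> dict[str, list[str]]:
--     current_keys = set(current.keys())
--     baseline_keys = set(baseline.keys())
--     return {
--         "added": sorted(current_keys - baseline_keys),
--         "removed": sorted(baseline_keys - current_keys),
--         "changed": sorted([k for k in current_keys & baseline_keys if current.get(k) != baseline.get(k)]),
--     }
-- ===== SOURCE B (Python) =====
-- def _root_key_diff(current, baseline):
--     # Sort-then-merge: walk the two sorted key lists with two pointers; the three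
--     # result lists come out already sorted, so no set operations and no final sort.
--     ck = sorted(current)
--     bk = sorted(baseline)
--     added, removed, changed = [], [], []
--     i = j = 0
--     while i < len(ck) and j < len(bk):
--         if ck[i] < bk[j]:
--             added.append(ck[i])
--             i += 1
--         elif bk[j] < ck[i]:
--             removed.append(bk[j])
--             j += 1
--         else:
--             if current.get(ck[i]) != baseline.get(bk[j]):
--                 changed.append(ck[i])
--             i += 1
--             j += 1
--     added.extend(ck[i:])
--     removed.extend(bk[j:])
--     return {"added": added, "removed": removed, "changed": changed}
-- ===== Notes on version B (the rewrite author's own statement) =====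
-- stated objective: alternative
-- what changed: Replaces A's three hash-set operations followed by three sorts with a sort-then-merge: both key lists are sorted first and a single two-pointer merge scan classifies each key into added/removed/changed, producing the three lists already in sorted order with no set objects and no post-sorting.
import Mathlib
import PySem

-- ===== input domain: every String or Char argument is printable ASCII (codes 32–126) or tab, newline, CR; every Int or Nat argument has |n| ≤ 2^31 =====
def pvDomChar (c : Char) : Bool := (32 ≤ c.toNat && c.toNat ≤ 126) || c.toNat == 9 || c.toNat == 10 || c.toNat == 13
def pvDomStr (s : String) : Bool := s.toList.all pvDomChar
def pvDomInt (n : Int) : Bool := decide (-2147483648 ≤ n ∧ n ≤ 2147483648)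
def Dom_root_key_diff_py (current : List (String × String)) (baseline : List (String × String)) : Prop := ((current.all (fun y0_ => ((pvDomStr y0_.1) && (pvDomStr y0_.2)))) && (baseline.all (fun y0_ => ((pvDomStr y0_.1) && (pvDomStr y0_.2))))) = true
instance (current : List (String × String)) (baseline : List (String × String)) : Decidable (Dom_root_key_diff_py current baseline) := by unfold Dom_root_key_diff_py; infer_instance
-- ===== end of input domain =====

-- B replaces A's set-difference/intersection-then-sort computation by a sort-then-merge:
-- both key lists are sorted first and one two-pointer merge classifies every key, so the
-- three result lists come out already sorted (objective: alternative algorithm).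

-- ===== PORT A =====
-- current_keys = set(current.keys()); baseline_keys = set(baseline.keys());
-- return {"added": sorted(ck - bk), "removed": sorted(bk - ck),
--         "changed": sorted([k for k in ck & bk if current.get(k) != baseline.get(k)])}
-- dict.get is first-match lookup on the association list; set(...) is PySem.Set.ofList.
def root_key_diff_py (current : List (String × String)) (baseline : List (String × String)) : List (String × List String) :=
  let current_keys := PySem.Set.ofList (current.map Prod.fst)
  let baseline_keys := PySem.Set.ofList (baseline.map Prod.fst)
  [("added", PySem.List.sorted (PySem.Set.diff current_keys baseline_keys) (fun x => x) false),
   ("removed", PySem.List.sorted (PySem.Set.diff baseline_keys current_keys) (fun x => x) false),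
   ("changed", PySem.List.sorted
      ((PySem.Set.inter current_keys baseline_keys).filter
        (fun k => current.lookup k != baseline.lookup k)) (fun x => x) false)]

-- ===== PORT B =====
-- the two-pointer while loop of Source B as structural recursion on the two sorted key
-- lists; the base cases are the trailing 'added.extend(ck[i:])' / 'removed.extend(bk[j:])'.
def pvMergeDiff (current : List (String × String)) (baseline : List (String × String)) :
    List String → List String → List String × List String × List String
  | [], bs => ([], bs, [])
  | a :: as_, [] => (a :: as_, [], [])
  | a :: as_, b :: bs =>
    if a < b then
      let r := pvMergeDiff current baseline as_ (b :: bs)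
      (a :: r.1, r.2.1, r.2.2)
    else if b < a then
      let r := pvMergeDiff current baseline (a :: as_) bs
      (r.1, b :: r.2.1, r.2.2)
    else
      let r := pvMergeDiff current baseline as_ bs
      if current.lookup a != baseline.lookup b then (r.1, r.2.1, a :: r.2.2)
      else r
termination_by as_ bs => as_.length + bs.length

-- ck = sorted(current); bk = sorted(baseline); merge; return the three lists.
def root_key_diff_py_alt (current : List (String × String)) (baseline : List (String × String)) : List (String × List String) :=
  let ck := PySem.List.sorted (current.map Prod.fst) (fun x => x) false
  let bk := PySem.List.sorted (baseline.map Prod.fst) (fun x => x) false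
  let r := pvMergeDiff current baseline ck bk
  [("added", r.1), ("removed", r.2.1), ("changed", r.2.2)]

-- ===== PRECONDITION & SPEC =====
-- Pre_ excludes association lists with duplicate keys: a Python dict cannot contain a
-- duplicate key, so such lists encode no actual input of A (dict(...) would collapse them).
def Pre_root_key_diff_py (current : List (String × String)) (baseline : List (String × String)) : Prop :=
  (current.map Prod.fst).Nodup ∧ (baseline.map Prod.fst).Nodup
instance (current : List (String × String)) (baseline : List (String × String)) : Decidable (Pre_root_key_diff_py current baseline) := by unfold Pre_root_key_diff_py; infer_instance

def pvWitness_root_key_diff_py : (List (String × String)) × (List (String × String)) :=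
  ([("a", "1"), ("b", "2")], [("b", "3"), ("c", "4")])

def Spec_root_key_diff_py (current : List (String × String)) (baseline : List (String × String)) (out : List (String × List String)) : Prop := out = root_key_diff_py_alt current baseline
instance (current : List (String × String)) (baseline : List (String × String)) (out : List (String × List String)) : Decidable (Spec_root_key_diff_py current baseline out) := by unfold Spec_root_key_diff_py; infer_instance

-- ===== CLAIM (what is proved, stated in full; the proofs are below) =====
def Claim_equal_root_key_diff_py : Prop := ∀ (current : List (String × String)) (baseline : List (String × String)), Dom_root_key_diff_py current baseline → Pre_root_key_diff_py current baseline → Spec_root_key_diff_py current baseline (root_key_diff_py current baseline)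

-- ===== LEMMAS AND PROOFS =====

-- key membership test by List.contains agrees after sorting
theorem contains_sorted (xs : List String) (k : String) :
    (PySem.List.sorted xs (fun x => x) false).contains k = xs.contains k := by
  simp [PySem.List.mem_sorted]

-- a sort of a duplicate-free key list is strictly increasing
theorem sorted_pairwise_lt_of_nodup (xs : List String) (h : xs.Nodup) :
    (PySem.List.sorted xs (fun x => x) false).Pairwise (· < ·) := by
  rw [← PySem.Set.ofList_eq_self_of_nodup xs h]
  exact PySem.List.sorted_ofList_pairwise_lt xs

-- the merge of two strictly increasing lists is the three filters
theorem pvMergeDiff_eq (current baseline : List (String × String)) :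
    ∀ (as_ bs : List String), as_.Pairwise (· < ·) → bs.Pairwise (· < ·) →
    pvMergeDiff current baseline as_ bs =
      (as_.filter (fun a => !bs.contains a),
       bs.filter (fun x => !as_.contains x),
       as_.filter (fun a => bs.contains a && (current.lookup a != baseline.lookup a))) := by
  intro as_
  induction as_ with
  | nil =>
    intro bs _ _
    simp [pvMergeDiff]
  | cons a as_ ih =>
    intro bs
    induction bs with
    | nil => intro _ _; simp [pvMergeDiff]
    | cons b bs ihb =>
      intro ha hb
      have ha' := (List.pairwise_cons.mp ha).2
      have haf := (List.pairwise_cons.mp ha).1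
      have hb' := (List.pairwise_cons.mp hb).2
      have hbf := (List.pairwise_cons.mp hb).1
      by_cases hab : a < b
      · -- a < b : a goes to added, and a occurs nowhere in b :: bs
        have hanotb : ∀ x ∈ b :: bs, ¬ x = a := by
          intro x hx h
          rcases List.mem_cons.mp hx with rfl | hx
          · exact absurd hab (h ▸ lt_irrefl _)
          · exact absurd (lt_trans hab (hbf x hx)) (h ▸ lt_irrefl _)
        have hmem : a ∉ b :: bs := fun hx => hanotb a hx rfl
        have e1 : (a :: as_).filter (fun x => !(b :: bs).contains x)
            = a :: as_.filter (fun x => !(b :: bs).contains x) :=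
          List.filter_cons_of_pos (by simp [hmem])
        have e2 : (b :: bs).filter (fun x => !(a :: as_).contains x)
            = (b :: bs).filter (fun x => !as_.contains x) :=
          List.filter_congr fun x hx => by simp [hanotb x hx]
        have e3 : (a :: as_).filter (fun x => (b :: bs).contains x && (current.lookup x != baseline.lookup x))
            = as_.filter (fun x => (b :: bs).contains x && (current.lookup x != baseline.lookup x)) :=
          List.filter_cons_of_neg (by simp [hmem])
        rw [pvMergeDiff]
        simp only [if_pos hab]
        rw [ih (b :: bs) ha' hb, e1, e2, e3]
      · by_cases hba : b < a
        · -- b < a : b goes to removed, and b occurs nowhere in a :: as_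
          have hbnota : ∀ x ∈ a :: as_, ¬ x = b := by
            intro x hx h
            rcases List.mem_cons.mp hx with rfl | hx
            · exact absurd hba (h ▸ lt_irrefl _)
            · exact absurd (lt_trans hba (haf x hx)) (h ▸ lt_irrefl _)
          have hmem : b ∉ a :: as_ := fun hx => hbnota b hx rfl
          have e1 : (a :: as_).filter (fun x => !(b :: bs).contains x)
              = (a :: as_).filter (fun x => !bs.contains x) :=
            List.filter_congr fun x hx => by simp [hbnota x hx]
          have e2 : (b :: bs).filter (fun x => !(a :: as_).contains x)
              = b :: bs.filter (fun x => !(a :: as_).contains x) :=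
            List.filter_cons_of_pos (by simp [hmem])
          have e3 : (a :: as_).filter (fun x => (b :: bs).contains x && (current.lookup x != baseline.lookup x))
              = (a :: as_).filter (fun x => bs.contains x && (current.lookup x != baseline.lookup x)) :=
            List.filter_congr fun x hx => by simp [hbnota x hx]
          rw [pvMergeDiff]
          simp only [if_neg hab, if_pos hba]
          rw [ihb ha hb', e1, e2, e3]
        · -- equal heads: a is compared for a value change and both heads are consumed
          have heq : a = b := le_antisymm (not_lt.mp hba) (not_lt.mp hab)
          subst heq
          have hanotbs : ∀ x ∈ bs, ¬ x = a := fun x hx h => absurd (hbf x hx) (h ▸ lt_irrefl _)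
          have hanotas : ∀ x ∈ as_, ¬ x = a := fun x hx h => absurd (haf x hx) (h ▸ lt_irrefl _)
          have e1 : (a :: as_).filter (fun x => !(a :: bs).contains x)
              = as_.filter (fun x => !bs.contains x) := by
            rw [List.filter_cons_of_neg (by simp)]
            exact List.filter_congr fun x hx => by simp [hanotas x hx]
          have e2 : (a :: bs).filter (fun x => !(a :: as_).contains x)
              = bs.filter (fun x => !as_.contains x) := by
            rw [List.filter_cons_of_neg (by simp)]
            exact List.filter_congr fun x hx => by simp [hanotbs x hx]
          rw [pvMergeDiff]
          simp only [lt_irrefl, if_false]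
          rw [ih bs ha' hb']
          by_cases hv : (current.lookup a != baseline.lookup a) = true
          · have e3 : (a :: as_).filter (fun x => (a :: bs).contains x && (current.lookup x != baseline.lookup x))
                = a :: as_.filter (fun x => bs.contains x && (current.lookup x != baseline.lookup x)) := by
              rw [List.filter_cons_of_pos (by simp [hv])]
              exact congrArg (a :: ·) (List.filter_congr fun x hx => by simp [hanotas x hx])
            simp only [if_pos hv]
            rw [e1, e2, e3]
          · have e3 : (a :: as_).filter (fun x => (a :: bs).contains x && (current.lookup x != baseline.lookup x))
                = as_.filter (fun x => bs.contains x && (current.lookup x != baseline.lookup x)) := by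
              rw [List.filter_cons_of_neg (by simp [hv])]
              exact List.filter_congr fun x hx => by simp [hanotas x hx]
            simp only [if_neg hv]
            rw [e1, e2, e3]

-- sorting commutes with filtering a duplicate-free list
theorem sorted_filter_comm (xs : List String) (p : String → Bool) (h : xs.Nodup) :
    PySem.List.sorted (xs.filter p) (fun x => x) false =
      (PySem.List.sorted xs (fun x => x) false).filter p := by
  apply PySem.List.sorted_eq_of_perm_of_pairwise_lt
  · exact (PySem.List.sorted_perm xs (fun x => x) false).filter p
  · exact List.Pairwise.filter p (sorted_pairwise_lt_of_nodup xs h)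

-- ===== VERDICT (by name: the statement is the Claim_ definition above) =====
theorem root_key_diff_py_spec : Claim_equal_root_key_diff_py := by
  intro current baseline _ hpre
  obtain ⟨hc, hb⟩ := hpre
  unfold Spec_root_key_diff_py
  simp only [root_key_diff_py, root_key_diff_py_alt]
  rw [pvMergeDiff_eq current baseline _ _
        (sorted_pairwise_lt_of_nodup _ hc) (sorted_pairwise_lt_of_nodup _ hb)]
  have hcs : PySem.Set.ofList (current.map Prod.fst) = current.map Prod.fst :=
    PySem.Set.ofList_eq_self_of_nodup _ hc
  have hbs : PySem.Set.ofList (baseline.map Prod.fst) = baseline.map Prod.fst :=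
    PySem.Set.ofList_eq_self_of_nodup _ hb
  have hA : PySem.Set.diff (PySem.Set.ofList (current.map Prod.fst))
        (PySem.Set.ofList (baseline.map Prod.fst)) =
      (current.map Prod.fst).filter
        (fun a => !(PySem.List.sorted (baseline.map Prod.fst) (fun x => x) false).contains a) := by
    unfold PySem.Set.diff PySem.Set.contains
    rw [hcs, hbs]
    exact List.filter_congr (fun x _ => by rw [contains_sorted])
  have hR : PySem.Set.diff (PySem.Set.ofList (baseline.map Prod.fst))
        (PySem.Set.ofList (current.map Prod.fst)) =
      (baseline.map Prod.fst).filter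
        (fun a => !(PySem.List.sorted (current.map Prod.fst) (fun x => x) false).contains a) := by
    unfold PySem.Set.diff PySem.Set.contains
    rw [hcs, hbs]
    exact List.filter_congr (fun x _ => by rw [contains_sorted])
  have hC : (PySem.Set.inter (PySem.Set.ofList (current.map Prod.fst))
          (PySem.Set.ofList (baseline.map Prod.fst))).filter
        (fun k => current.lookup k != baseline.lookup k) =
      (current.map Prod.fst).filter
        (fun a => (PySem.List.sorted (baseline.map Prod.fst) (fun x => x) false).contains a &&
          (current.lookup a != baseline.lookup a)) := by
    unfold PySem.Set.inter PySem.Set.contains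
    rw [hcs, hbs, List.filter_filter]
    exact List.filter_congr (fun x _ => by rw [contains_sorted]; exact Bool.and_comm _ _)
  rw [hA, hR, hC, sorted_filter_comm _ _ hc, sorted_filter_comm _ _ hb,
    sorted_filter_comm _ _ hc]
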